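-- pv_equiv track=rewrite | github.com/thewarbo/advent-of-code | 10/single-solution.py | completion
-- ===== SOURCE A (Python) =====
-- pairs = {"<" : ">", "{" : "}", "(" : ")", "[":"]"}
--
-- def completion(line):
--     stack = []
--     for symbol in line:
--         if symbol in ["<", "{", "(", "["]:
--             stack.append(symbol)
--         elif len(stack) == 0:
--             return None
--         elif pairs[stack.pop()] != symbol:
--             return None
--     stack.reverse()
--     return "".join(map(lambda t: pairs[t], stack))
-- ===== SOURCE B (Python) =====
-- # Alternative: complete by iterated cancellation of adjacent matched pairs instead of a stack.
-- pairs = {"<" : ">", "{" : "}", "(" : ")", "[":"]"}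
--
-- def completion(line):
--     s = line
--     while True:
--         t = s.replace("()", "").replace("[]", "").replace("{}", "").replace("<>", "")
--         if t == s:
--             break
--         s = t
--     if any(c not in "<{([" for c in s):
--         return None
--     return "".join(pairs[c] for c in reversed(s))
-- ===== Notes on version B (the rewrite author's own statement) =====
-- stated objective: alternative
-- what changed: Replaces A's single-pass stack simulation by iterated cancellation: repeatedly delete every adjacent matched pair via str.replace until a fixpoint, then reject if any non-opener survives, else map the reversed residue of openers to closers.
import Mathlib
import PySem

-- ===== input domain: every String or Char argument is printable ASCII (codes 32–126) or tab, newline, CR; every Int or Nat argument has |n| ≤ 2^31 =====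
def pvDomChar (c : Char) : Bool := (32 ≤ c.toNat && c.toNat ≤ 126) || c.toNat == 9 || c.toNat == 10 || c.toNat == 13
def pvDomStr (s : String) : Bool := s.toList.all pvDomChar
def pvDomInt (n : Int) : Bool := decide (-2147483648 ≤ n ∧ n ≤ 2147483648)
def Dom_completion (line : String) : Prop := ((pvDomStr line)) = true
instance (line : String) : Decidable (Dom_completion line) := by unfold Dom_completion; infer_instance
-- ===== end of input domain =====

-- B completes the bracket sequence by iterated cancellation of adjacent matched pairs instead of A's
-- one-pass stack (objective: alternative decomposition, not faster).

-- ===== PORT A =====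
-- the module-level dict `pairs` (both programs look it up only at opener keys)
def pairC (c : Char) : Char :=
  if c = '<' then '>' else if c = '{' then '}' else if c = '(' then ')' else ']'

-- A's loop; the Python stack is kept top-first (cons = append, head = pop),
-- so Python's final `stack.reverse()` makes the result list exactly this list.
def runA : List Char → List Char → Option (List Char)
  | st, [] => some st
  | st, c :: t =>
    if c = '<' ∨ c = '{' ∨ c = '(' ∨ c = '[' then runA (c :: st) t
    else match st with
      | [] => none                                         -- len(stack) == 0
      | top :: rest => if pairC top ≠ c then none else runA rest t

def completion (line : String) : Option String :=
  match runA [] line.toList with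
  | none => none
  | some st => some (String.ofList (st.map pairC))   -- "".join(map(lambda t: pairs[t], stack))

-- ===== PORT B =====
-- removal of all (non-overlapping, left-to-right) occurrences of the two-char substring [a,b]:
-- this is exactly what s.replace(ab, "") computes (replace_pair_eq below; needed for termination)
def remPair (a b : Char) : List Char → List Char
  | [] => []
  | [c] => [c]
  | c :: d :: t => if c = a ∧ d = b then remPair a b t else c :: remPair a b (d :: t)

theorem go_eq (a b : Char) : ∀ (fuel : Nat) (l acc : List Char), l.length ≤ fuel →
    PySem.Chars.replace.go [a,b] [] fuel l acc = acc.reverse ++ remPair a b l := by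
  intro fuel
  induction fuel with
  | zero =>
    intro l acc hl
    have : l = [] := by cases l <;> simp_all
    subst this
    simp [PySem.Chars.replace.go, remPair]
  | succ n ih =>
    intro l acc hl
    match l with
    | [] => simp [PySem.Chars.replace.go, remPair]
    | [c] =>
      have h1 : List.isPrefixOf [a,b] [c] = false := by simp [List.isPrefixOf]
      simp only [PySem.Chars.replace.go, h1, Bool.false_eq_true, if_false]
      rw [ih [] (c :: acc) (by simp)]
      simp [remPair]
    | c :: d :: t =>
      have hpre : List.isPrefixOf [a,b] (c :: d :: t) = (a == c && b == d) := by
        simp [List.isPrefixOf]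
      by_cases hc : c = a ∧ d = b
      · obtain ⟨hc1, hc2⟩ := hc
        subst hc1; subst hc2
        simp only [PySem.Chars.replace.go, hpre, BEq.rfl, Bool.and_self, if_true]
        rw [show List.drop (List.length [c,d]) (c :: d :: t) = t from rfl,
            show ([] : List Char).reverse ++ acc = acc from by simp]
        rw [ih t acc (by simp at hl; omega)]
        simp [remPair]
      · have hb : (a == c && b == d) = false := by
          rcases not_and_or.mp hc with h | h
          · simp [beq_iff_eq]; intro h'; exact absurd h'.symm h
          · simp [beq_iff_eq]; intro _ h'; exact absurd h'.symm h
        simp only [PySem.Chars.replace.go, hpre, hb, Bool.false_eq_true, if_false]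
        rw [ih (d :: t) (c :: acc) (by simp at hl ⊢; omega)]
        simp only [remPair, if_neg hc]
        simp

theorem replace_pair_eq (a b : Char) (s : List Char) :
    PySem.Chars.replace s [a,b] [] = remPair a b s := by
  simp only [PySem.Chars.replace]
  rw [if_neg (by simp)]
  rw [go_eq a b s.length s [] le_rfl]
  simp

theorem remPair_length_le (a b : Char) (l : List Char) :
    (remPair a b l).length ≤ l.length := by
  fun_induction remPair a b l <;> simp_all <;> try omega

theorem remPair_eq_of_length (a b : Char) (l : List Char)
    (h : (remPair a b l).length = l.length) : remPair a b l = l := by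
  fun_induction remPair a b l with
  | case1 => rfl
  | case2 c => rfl
  | case3 c d t hc ih =>
    exfalso
    have hle := remPair_length_le a b t
    simp only [List.length_cons] at h
    omega
  | case4 c d t hc ih =>
    simp only [List.length_cons] at h
    rw [ih (by simp only [List.length_cons]; omega)]

-- one pass of Source B's while body: the four replaces in order
def stepB (s : List Char) : List Char :=
  PySem.Chars.replace (PySem.Chars.replace (PySem.Chars.replace
    (PySem.Chars.replace s ['(',')'] []) ['[',']'] []) ['{','}'] []) ['<','>'] []

theorem stepB_length (s : List Char) :
    (stepB s).length ≤ s.length ∧ ((stepB s).length = s.length → stepB s = s) := by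
  unfold stepB
  rw [replace_pair_eq, replace_pair_eq, replace_pair_eq, replace_pair_eq]
  have h1 := remPair_length_le '(' ')' s
  have h2 := remPair_length_le '[' ']' (remPair '(' ')' s)
  have h3 := remPair_length_le '{' '}' (remPair '[' ']' (remPair '(' ')' s))
  have h4 := remPair_length_le '<' '>' (remPair '{' '}' (remPair '[' ']' (remPair '(' ')' s)))
  refine ⟨by omega, ?_⟩
  intro he
  have e1 := remPair_eq_of_length '(' ')' s (by omega)
  rw [e1] at h2 h3 h4 he ⊢
  have e2 := remPair_eq_of_length '[' ']' s (by omega)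
  rw [e2] at h3 h4 he ⊢
  have e3 := remPair_eq_of_length '{' '}' s (by omega)
  rw [e3] at h4 he ⊢
  exact remPair_eq_of_length '<' '>' s (by omega)

-- Source B's while loop: repeat stepB until it stops changing
def reduceB (s : List Char) : List Char :=
  if h : stepB s = s then s else reduceB (stepB s)
termination_by s.length
decreasing_by
  exact lt_of_le_of_ne (stepB_length s).1 (fun he => h ((stepB_length s).2 he))

def isOpenerB (c : Char) : Bool := c == '<' || c == '{' || c == '(' || c == '['

def completion_alt (line : String) : Option String :=
  if (reduceB line.toList).any (fun c => !isOpenerB c) then none   -- any(c not in "<{([" for c in s)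
  else some (String.ofList ((reduceB line.toList).reverse.map pairC))  -- "".join(pairs[c] for c in reversed(s))

-- ===== PRECONDITION & SPEC =====
def Spec_completion (line : String) (out : Option String) : Prop := out = completion_alt line
instance (line : String) (out : Option String) : Decidable (Spec_completion line out) := by unfold Spec_completion; infer_instance

-- ===== CLAIM (what is proved, stated in full; the proofs are below) =====
def Claim_equal_completion : Prop := ∀ (line : String), Dom_completion line → Spec_completion line (completion line)

-- ===== LEMMAS AND PROOFS =====

theorem runA_cons (st : List Char) (c : Char) (t : List Char) :
    runA st (c :: t) =
      if c = '<' ∨ c = '{' ∨ c = '(' ∨ c = '[' then runA (c :: st) t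
      else match st with
        | [] => none
        | top :: rest => if pairC top ≠ c then none else runA rest t := by
  cases st <;> rfl

-- the stack run is invariant under cancelling matched pairs
theorem runA_remPair (a b : Char) (ha : a = '<' ∨ a = '{' ∨ a = '(' ∨ a = '[')
    (hb : pairC a = b) (hbn : ¬(b = '<' ∨ b = '{' ∨ b = '(' ∨ b = '[')) (l : List Char) :
    ∀ st, runA st (remPair a b l) = runA st l := by
  fun_induction remPair a b l with
  | case1 => intro st; rfl
  | case2 c => intro st; rfl
  | case3 c d t hc ih =>
    obtain ⟨hc1, hc2⟩ := hc
    intro st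
    rw [ih st, hc1, hc2]
    rw [runA_cons st a (b :: t), if_pos ha, runA_cons (a :: st) b t, if_neg hbn]
    simp [hb]
  | case4 c d t hc ih =>
    intro st
    by_cases hco : c = '<' ∨ c = '{' ∨ c = '(' ∨ c = '['
    · rw [runA_cons st c (remPair a b (d :: t)), if_pos hco,
          runA_cons st c (d :: t), if_pos hco]
      exact ih (c :: st)
    · rw [runA_cons st c (remPair a b (d :: t)), if_neg hco,
          runA_cons st c (d :: t), if_neg hco]
      match st with
      | [] => rfl
      | top :: rest =>
        by_cases ht : pairC top ≠ c
        · simp only [if_pos ht]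
        · simp only [if_neg ht]
          exact ih rest

theorem runA_stepB (s : List Char) (st : List Char) :
    runA st (stepB s) = runA st s := by
  unfold stepB
  rw [replace_pair_eq, replace_pair_eq, replace_pair_eq, replace_pair_eq]
  rw [runA_remPair '<' '>' (by decide) (by decide) (by decide)]
  rw [runA_remPair '{' '}' (by decide) (by decide) (by decide)]
  rw [runA_remPair '[' ']' (by decide) (by decide) (by decide)]
  rw [runA_remPair '(' ')' (by decide) (by decide) (by decide)]

theorem runA_reduceB (s : List Char) : ∀ st, runA st (reduceB s) = runA st s := by
  fun_induction reduceB s with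
  | case1 s h => intro st; rfl
  | case2 s h ih => intro st; rw [ih st]; exact runA_stepB s st

theorem stepB_reduceB (s : List Char) : stepB (reduceB s) = reduceB s := by
  fun_induction reduceB s with
  | case1 s h => exact h
  | case2 s h ih => exact ih

-- a stepB-fixpoint is a fixpoint of each of the four cancellations
theorem remPair_fix_of_stepB_fix (r : List Char) (h : stepB r = r) :
    remPair '(' ')' r = r ∧ remPair '[' ']' r = r ∧ remPair '{' '}' r = r ∧ remPair '<' '>' r = r := by
  unfold stepB at h
  rw [replace_pair_eq, replace_pair_eq, replace_pair_eq, replace_pair_eq] at h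
  have h1 := remPair_length_le '(' ')' r
  have h2 := remPair_length_le '[' ']' (remPair '(' ')' r)
  have h3 := remPair_length_le '{' '}' (remPair '[' ']' (remPair '(' ')' r))
  have h4 := remPair_length_le '<' '>' (remPair '{' '}' (remPair '[' ']' (remPair '(' ')' r)))
  have hlen : (remPair '<' '>' (remPair '{' '}' (remPair '[' ']' (remPair '(' ')' r)))).length = r.length := by
    rw [h]
  have e1 := remPair_eq_of_length '(' ')' r (by omega)
  rw [e1] at h h2 h3 h4 hlen
  have e2 := remPair_eq_of_length '[' ']' r (by omega)
  rw [e2] at h h3 h4 hlen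
  have e3 := remPair_eq_of_length '{' '}' r (by omega)
  rw [e3] at h h4 hlen
  exact ⟨e1, e2, e3, h⟩

theorem remPair_strict (a b : Char) : ∀ (u v : List Char),
    (remPair a b (u ++ a :: b :: v)).length < (u ++ a :: b :: v).length := by
  intro u
  induction u with
  | nil =>
    intro v
    have := remPair_length_le a b v
    simp [remPair]
    omega
  | cons c u' ih =>
    intro v
    have hne : u' ++ a :: b :: v ≠ [] := by simp
    match hw : u' ++ a :: b :: v with
    | [] => exact absurd hw hne
    | d :: t =>
      rw [List.cons_append, hw, remPair]
      split
      · have := remPair_length_le a b t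
        have hlt : t.length + 1 = (d :: t).length := by simp
        have hlw : (d :: t).length = (u' ++ a :: b :: v).length := by rw [hw]
        simp only [List.length_cons]
        omega
      · have hihv := ih v
        rw [hw] at hihv
        simp only [List.length_cons] at hihv ⊢
        omega

theorem noPair (a b : Char) (r : List Char) (h : remPair a b r = r) :
    ∀ u v, r ≠ u ++ a :: b :: v := by
  intro u v he
  have hs := remPair_strict a b u v
  rw [← he, h] at hs
  exact lt_irrefl _ hs

theorem runA_openers : ∀ (os : List Char), (∀ c ∈ os, c = '<' ∨ c = '{' ∨ c = '(' ∨ c = '[') →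
    ∀ (v st : List Char), runA st (os ++ v) = runA (os.reverse ++ st) v := by
  intro os
  induction os with
  | nil => intro _ v st; rfl
  | cons o os' ih =>
    intro h v st
    have ho := h o (by simp)
    rw [List.cons_append, runA_cons st o (os' ++ v), if_pos ho]
    rw [ih (fun c hc => h c (List.mem_cons_of_mem _ hc)) v (o :: st)]
    simp

-- decompose a list having a non-opener into openers ++ first non-opener ++ rest
theorem first_nonopener : ∀ (r : List Char), (¬ ∀ c ∈ r, isOpenerB c = true) →
    ∃ os c v, r = os ++ c :: v ∧ (∀ x ∈ os, isOpenerB x = true) ∧ isOpenerB c = false := by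
  intro r
  induction r with
  | nil => intro h; exact absurd (by simp) h
  | cons d t ih =>
    intro h
    by_cases hd : isOpenerB d = true
    · have ht : ¬ ∀ c ∈ t, isOpenerB c = true := by
        intro hall
        apply h
        intro c hc
        rcases List.mem_cons.mp hc with h1 | h2
        · rw [h1]; exact hd
        · exact hall c h2
      obtain ⟨os, c, v, he, hos, hc⟩ := ih ht
      refine ⟨d :: os, c, v, by simp [he], ?_, hc⟩
      intro x hx
      rcases List.mem_cons.mp hx with h1 | h2
      · rw [h1]; exact hd
      · exact hos x h2
    · exact ⟨[], d, t, rfl, by simp, by simpa using hd⟩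

theorem isOpenerB_iff (c : Char) :
    isOpenerB c = true ↔ (c = '<' ∨ c = '{' ∨ c = '(' ∨ c = '[') := by
  simp [isOpenerB]
  tauto

-- ===== VERDICT (by name: the statement is the Claim_ definition above) =====
theorem completion_spec : Claim_equal_completion := by
  intro line _
  unfold Spec_completion completion completion_alt
  have hA : runA [] line.toList = runA [] (reduceB line.toList) :=
    (runA_reduceB line.toList []).symm
  set r := reduceB line.toList with hr
  obtain ⟨f1, f2, f3, f4⟩ := remPair_fix_of_stepB_fix r (stepB_reduceB line.toList)
  by_cases hall : ∀ c ∈ r, isOpenerB c = true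
  · -- reduced string is all openers: both complete it
    have hany : r.any (fun c => !isOpenerB c) = false := by
      simp only [List.any_eq_false]
      intro c hc; simp [hall c hc]
    have hosp : ∀ c ∈ r, c = '<' ∨ c = '{' ∨ c = '(' ∨ c = '[' := by
      intro c hc; exact (isOpenerB_iff c).mp (hall c hc)
    have hsome : runA [] r = some r.reverse := by
      have h0 := runA_openers r hosp [] []
      simpa [runA] using h0
    rw [hA, hsome, hany]
    simp
  · -- a non-opener survives reduction: both reject
    have hany : r.any (fun c => !isOpenerB c) = true := by
      simp only [List.any_eq_true]
      push Not at hall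
      obtain ⟨c, hc, hco⟩ := hall
      exact ⟨c, hc, by simp [hco]⟩
    obtain ⟨os, c, v, he, hos, hc⟩ := first_nonopener r hall
    have hosp : ∀ x ∈ os, x = '<' ∨ x = '{' ∨ x = '(' ∨ x = '[' := by
      intro x hx; exact (isOpenerB_iff x).mp (hos x hx)
    have hcn : ¬ (c = '<' ∨ c = '{' ∨ c = '(' ∨ c = '[') := by
      intro hco; rw [← isOpenerB_iff] at hco; rw [hc] at hco; exact Bool.false_ne_true hco
    have hrun : runA [] r = none := by
      rw [he, runA_openers os hosp (c :: v) [], runA_cons (os.reverse ++ []) c v, if_neg hcn]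
      match hrev : os.reverse ++ ([] : List Char) with
      | [] => rfl
      | g :: gs =>
        have hg : g ∈ os := by
          have hm : g ∈ os.reverse ++ ([] : List Char) := by rw [hrev]; simp
          simpa using hm
        have hgo := hosp g hg
        have hos_split : ∃ u, os = u ++ [g] := by
          have hr2 : os.reverse = g :: gs := by simpa using hrev
          exact ⟨gs.reverse, by rw [← List.reverse_reverse os, hr2]; simp⟩
        obtain ⟨u, hu⟩ := hos_split
        have hadj : r = u ++ g :: c :: v := by rw [he, hu]; simp
        have hne : pairC g ≠ c := by
          intro hpc
          rcases hgo with h | h | h | h <;> subst h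
          · have hc' : c = '>' := by rw [← hpc]; rfl
            exact noPair '<' '>' r f4 u v (by rw [hadj, hc'])
          · have hc' : c = '}' := by rw [← hpc]; rfl
            exact noPair '{' '}' r f3 u v (by rw [hadj, hc'])
          · have hc' : c = ')' := by rw [← hpc]; rfl
            exact noPair '(' ')' r f1 u v (by rw [hadj, hc'])
          · have hc' : c = ']' := by rw [← hpc]; rfl
            exact noPair '[' ']' r f2 u v (by rw [hadj, hc'])
        show (if pairC g ≠ c then none else runA gs v) = (none : Option (List Char))
        rw [if_pos hne]
    rw [hA, hrun, hany]
    simp
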